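-- pv_equiv track=rewrite | github.com/RUSTHONG/RosalindProblems | MatchingRandomMotifs/MatchingRandomMotifs.py | calComLog
-- ===== SOURCE A (Python) =====
-- def calComLog(dnaString):
--     codon_count = [0, 0]
--     for i in dnaString:
--         if i in ["A", "T"]:
--             codon_count[0] += 1
--         if i in ["C", "G"]:
--             codon_count[1] += 1
--     return codon_count
-- ===== SOURCE B (Python) =====
-- def calComLog(dnaString):
--     return [dnaString.count("A") + dnaString.count("T"),
--             dnaString.count("C") + dnaString.count("G")]
-- ===== Notes on version B (the rewrite author's own statement) =====
-- stated objective: idiomatic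
-- what changed: Replaced the explicit per-character loop with membership tests and list-index accumulators by direct str.count calls summed per nucleotide pair.
import Mathlib
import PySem

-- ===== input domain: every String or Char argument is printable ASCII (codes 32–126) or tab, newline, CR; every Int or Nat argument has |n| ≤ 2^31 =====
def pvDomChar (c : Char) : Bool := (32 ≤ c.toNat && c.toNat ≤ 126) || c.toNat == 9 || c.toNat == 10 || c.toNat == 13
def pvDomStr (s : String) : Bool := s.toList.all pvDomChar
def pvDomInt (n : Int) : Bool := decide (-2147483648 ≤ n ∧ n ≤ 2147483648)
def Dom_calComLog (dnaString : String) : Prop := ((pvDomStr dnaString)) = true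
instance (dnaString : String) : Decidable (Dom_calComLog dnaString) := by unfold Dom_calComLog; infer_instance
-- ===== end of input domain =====

-- B replaces A's per-character loop with per-nucleotide str.count calls (idiomatic; same cost).

-- ===== PORT A =====
-- literal port of A: one pass, pair accumulator, two independent membership tests per char
def calComLog (dnaString : String) : List Int :=
  let cc := dnaString.toList.foldl
    (fun (cc : Int × Int) i =>
      let cc := if i = 'A' ∨ i = 'T' then (cc.1 + 1, cc.2) else cc
      if i = 'C' ∨ i = 'G' then (cc.1, cc.2 + 1) else cc)
    (0, 0)
  [cc.1, cc.2]

-- ===== PORT B =====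
-- port of B: four str.count calls, no loop of our own
def calComLog_alt (dnaString : String) : List Int :=
  [(PySem.Str.count dnaString "A" : Int) + (PySem.Str.count dnaString "T" : Int),
   (PySem.Str.count dnaString "C" : Int) + (PySem.Str.count dnaString "G" : Int)]

-- ===== PRECONDITION & SPEC =====
def Spec_calComLog (dnaString : String) (out : List Int) : Prop := out = calComLog_alt dnaString
instance (dnaString : String) (out : List Int) : Decidable (Spec_calComLog dnaString out) := by unfold Spec_calComLog; infer_instance

-- ===== CLAIM (what is proved, stated in full; the proofs are below) =====
def Claim_equal_calComLog : Prop := ∀ (dnaString : String), Dom_calComLog dnaString → Spec_calComLog dnaString (calComLog dnaString)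

-- ===== LEMMAS AND PROOFS =====

-- ===== VERDICT (by name: the statement is the Claim_ definition above) =====
-- Python's str.count with a single-character needle is the plain character count
theorem countGo_singleton (c : Char) (l : List Char) (fuel acc : Nat)
    (h : l.length ≤ fuel) :
    PySem.Chars.count.go [c] fuel l acc = acc + l.count c := by
  induction l generalizing fuel acc with
  | nil => cases fuel <;> simp [PySem.Chars.count.go]
  | cons x t ih =>
    cases fuel with
    | zero => simp at h
    | succ n =>
      simp only [List.length_cons, Nat.succ_le_succ_iff] at h
      by_cases hx : c = x
      · subst hx
        simp [PySem.Chars.count.go, List.isPrefixOf, ih _ _ h, List.count_cons]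
        omega
      · have hpre : ¬ (List.isPrefixOf [c] (x :: t) = true) := by
          simp [List.isPrefixOf]; exact hx
        simp [PySem.Chars.count.go, hpre, ih _ _ h, List.count_cons]
        exact fun e => hx e.symm

theorem count_singleton (s : String) (c : Char) :
    PySem.Str.count s (String.ofList [c]) = s.toList.count c := by
  rw [PySem.Str.count_eq]
  have h1 : (String.ofList [c]).toList = [c] := by simp
  rw [h1]
  unfold PySem.Chars.count
  rw [if_neg (by simp)]
  rw [countGo_singleton c s.toList s.toList.length 0 le_rfl]
  omega

theorem loop_inv (l : List Char) (a b : Int) :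
    l.foldl
      (fun (cc : Int × Int) i =>
        let cc := if i = 'A' ∨ i = 'T' then (cc.1 + 1, cc.2) else cc
        if i = 'C' ∨ i = 'G' then (cc.1, cc.2 + 1) else cc)
      (a, b)
    = (a + l.count 'A' + l.count 'T', b + l.count 'C' + l.count 'G') := by
  induction l generalizing a b with
  | nil => simp
  | cons x t ih =>
    simp only [List.foldl_cons]
    by_cases h1 : x = 'A' ∨ x = 'T'
    · have h2 : ¬(x = 'C' ∨ x = 'G') := by rcases h1 with h|h <;> subst h <;> decide
      simp only [if_pos h1, if_neg h2, ih]
      rcases h1 with h|h <;> subst h <;>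
        refine Prod.ext ?_ ?_ <;> simp [List.count_cons] <;> push_cast <;> ring
    · by_cases h2 : x = 'C' ∨ x = 'G'
      · simp only [if_neg h1, if_pos h2, ih]
        rcases h2 with h|h <;> subst h <;>
          refine Prod.ext ?_ ?_ <;> simp [List.count_cons] <;> push_cast <;> ring
      · simp only [if_neg h1, if_neg h2, ih]
        push_neg at h1 h2
        refine Prod.ext ?_ ?_ <;>
          simp [List.count_cons, h1.1, h1.2, h2.1, h2.2]

theorem calComLog_spec : Claim_equal_calComLog := by
  intro s _
  unfold Spec_calComLog calComLog calComLog_alt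
  have hA := count_singleton s 'A'
  have hT := count_singleton s 'T'
  have hC := count_singleton s 'C'
  have hG := count_singleton s 'G'
  simp only [loop_inv]
  have eA : ("A" : String) = String.ofList ['A'] := rfl
  have eT : ("T" : String) = String.ofList ['T'] := rfl
  have eC : ("C" : String) = String.ofList ['C'] := rfl
  have eG : ("G" : String) = String.ofList ['G'] := rfl
  rw [eA, eT, eC, eG, hA, hT, hC, hG]
  simp
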